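-- pv_equiv track=rewrite | github.com/mandar-karhade/bioassert | bioassert/generator/post_process.py | _punct_space_positions
-- ===== SOURCE A (Python) =====
-- _PUNCT_CHARS = set(",.;:!?")
--
-- def _outside_any_span(pos: int, spans: dict[str, tuple[int, int]]) -> bool:
--     """True iff ``pos`` is not inside any labeled span content.
--
--     "Inside" means ``start <= pos < end`` (end is exclusive). A position
--     equal to a span *end* is outside; a position equal to a span *start*
--     is inside, since it refers to the span's first character.
--     """
--     for start, end in spans.values():
--         if start <= pos < end:
--             return False
--     return True
--
-- def _punct_space_positions(
--     sentence: str, spans: dict[str, tuple[int, int]]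
-- ) -> list[int]:
--     positions: list[int] = []
--     for i in range(1, len(sentence)):
--         if sentence[i] == " " and sentence[i - 1] in _PUNCT_CHARS:
--             if _outside_any_span(i, spans):
--                 positions.append(i)
--     return positions
-- ===== SOURCE B (Python) =====
-- _PUNCT_CHARS = set(",.;:!?")
--
-- def _punct_space_positions(sentence, spans):
--     """In-span boolean mask built once from the clamped spans, then str.find()
--     jumps from space to space instead of visiting every index (alternative strategy, not claimed faster)."""
--     n = len(sentence)
--     mask = bytearray(n)
--     for start, end in spans.values():
--         lo, hi = max(start, 0), max(min(end, n), 0)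
--         mask[lo:hi] = b"\x01" * (hi - lo)
--     positions = []
--     pos = sentence.find(" ", 1)
--     while pos != -1:
--         if sentence[pos - 1] in _PUNCT_CHARS and not mask[pos]:
--             positions.append(pos)
--         pos = sentence.find(" ", pos + 1)
--     return positions
-- ===== Notes on version B (the rewrite author's own statement) =====
-- stated objective: alternative
-- what changed: B precomputes a boolean in-span mask once from the clamped span intervals and then walks the sentence with str.find(' ', pos), visiting only space positions, instead of A's per-index loop that rescans every span at each punct-space candidate.
import Mathlib
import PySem

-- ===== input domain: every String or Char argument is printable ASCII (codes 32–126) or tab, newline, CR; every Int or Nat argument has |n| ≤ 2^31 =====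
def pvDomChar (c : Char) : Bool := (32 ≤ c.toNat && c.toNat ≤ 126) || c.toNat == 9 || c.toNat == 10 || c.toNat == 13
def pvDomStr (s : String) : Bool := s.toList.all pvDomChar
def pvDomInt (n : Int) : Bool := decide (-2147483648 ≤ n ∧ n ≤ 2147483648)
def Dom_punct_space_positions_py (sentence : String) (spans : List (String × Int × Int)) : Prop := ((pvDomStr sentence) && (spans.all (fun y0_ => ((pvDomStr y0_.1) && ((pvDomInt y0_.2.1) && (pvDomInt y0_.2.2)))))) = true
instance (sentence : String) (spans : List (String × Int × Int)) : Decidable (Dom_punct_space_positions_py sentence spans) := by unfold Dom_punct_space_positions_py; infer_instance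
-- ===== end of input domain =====

-- B replaces A's per-index loop (which rescans every span at each candidate) by a boolean
-- in-span mask built once from the clamped spans plus a find(' ')-driven walk that visits
-- only the space positions (objective: alternative).

-- ===== PORT A =====
def pvPunctChars : List Char := [',', '.', ';', ':', '!', '?']

def pvOutsideAnySpan (pos : Int) (vals : List (Int × Int)) : Bool :=
  match vals with
  | [] => true
  | (s, e) :: rest => if s ≤ pos ∧ pos < e then false else pvOutsideAnySpan pos rest

def punct_space_positions_py (sentence : String) (spans : List (String × Int × Int)) : List Int :=
  let d := PySem.Dict.ofList (spans.map (fun t => (t.1, (t.2.1, t.2.2))))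
  let cs := sentence.toList
  (PySem.List.pyRange 1 (cs.length : Int) 1).foldl
    (fun positions i =>
      if (PySem.List.pyGet? cs i == some ' ') &&
         ((PySem.List.pyGet? cs (i - 1)).any (fun c => pvPunctChars.contains c)) then
        if pvOutsideAnySpan i d.values then positions ++ [i] else positions
      else positions)
    []

-- ===== PORT B =====
-- termination helper for the find(' ', start) loop: a hit lies in [start, length)
theorem pv_findFrom_bounds (cs : List Char) (k : Nat)
    (h : ¬ PySem.Chars.findFrom cs [' '] (k : Int) none = -1) :
    k ≤ (PySem.Chars.findFrom cs [' '] (k : Int) none).toNat ∧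
      (PySem.Chars.findFrom cs [' '] (k : Int) none).toNat < cs.length := by
  by_cases hk : k ≤ cs.length
  · obtain ⟨h1, h2, -⟩ := PySem.Chars.findFrom_natCast_spec cs [' '] k hk h
    have hlen : (PySem.Chars.findFrom cs [' '] (k : Int) none).toNat < cs.length := by
      by_contra hge
      rw [List.drop_eq_nil_of_le (by omega)] at h2
      simp at h2
    exact ⟨by omega, hlen⟩
  · exfalso
    apply h
    simp [PySem.Chars.findFrom, show ¬((k : Int) < 0) by omega]
    intro h' _
    omega

-- the 'while pos != -1' loop of B, entered with the start index of the next find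
def pvScan (cs : List Char) (mask : Array Bool) (positions : List Int) (start : Nat) : List Int :=
  if h : PySem.Chars.findFrom cs [' '] (start : Int) none = -1 then positions
  else
    pvScan cs mask
      (if (PySem.List.pyGet? cs (PySem.Chars.findFrom cs [' '] (start : Int) none - 1)).any
            (fun c => pvPunctChars.contains c) &&
          !(mask.getD (PySem.Chars.findFrom cs [' '] (start : Int) none).toNat false) then
        positions ++ [PySem.Chars.findFrom cs [' '] (start : Int) none]
      else positions)
      ((PySem.Chars.findFrom cs [' '] (start : Int) none).toNat + 1)
termination_by cs.length + 1 - start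
decreasing_by
  have := pv_findFrom_bounds cs start h
  omega

def punct_space_positions_py_alt (sentence : String) (spans : List (String × Int × Int)) : List Int :=
  let cs := sentence.toList
  let n := cs.length
  let d := PySem.Dict.ofList (spans.map (fun t => (t.1, (t.2.1, t.2.2))))
  -- mask[lo:hi] = 1-bytes, ported index by index; lo, hi are clamped to [0, n], so this is exact
  let mask : Array Bool := d.values.foldl
    (fun m se =>
      (PySem.List.pyRange (max se.1 0) (max (min se.2 (n : Int)) 0) 1).foldl
        (fun m i => m.set! i.toNat true) m)
    (Array.replicate n false)
  pvScan cs mask [] 1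

-- ===== PRECONDITION & SPEC =====
def Spec_punct_space_positions_py (sentence : String) (spans : List (String × Int × Int)) (out : List Int) : Prop := out = punct_space_positions_py_alt sentence spans
instance (sentence : String) (spans : List (String × Int × Int)) (out : List Int) : Decidable (Spec_punct_space_positions_py sentence spans out) := by unfold Spec_punct_space_positions_py; infer_instance

-- ===== CLAIM (what is proved, stated in full; the proofs are below) =====
def Claim_equal_punct_space_positions_py : Prop := ∀ (sentence : String) (spans : List (String × Int × Int)), Dom_punct_space_positions_py sentence spans → Spec_punct_space_positions_py sentence spans (punct_space_positions_py sentence spans)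

-- ===== LEMMAS AND PROOFS =====

-- marking one clamped range in the mask preserves the size
theorem pv_size_mark (l : List Int) (m : Array Bool) :
    (l.foldl (fun m i => m.set! i.toNat true) m).size = m.size := by
  induction l generalizing m with
  | nil => rfl
  | cons x xs ih =>
    rw [List.foldl_cons, ih]
    simp [Array.set!]

-- effect of marking range [lo, hi) on one cell
theorem pv_getD_mark (k : Nat) (lo hi : Int) (m : Array Bool) (j : Nat)
    (hlo : 0 ≤ lo) (hhi : hi ≤ (m.size : Int)) (hk : (hi - lo).toNat = k) :
    ((PySem.List.pyRange lo hi 1).foldl (fun m i => m.set! i.toNat true) m).getD j false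
      = (m.getD j false || decide (lo ≤ (j : Int) ∧ (j : Int) < hi)) := by
  induction k generalizing lo m with
  | zero =>
    rw [PySem.List.pyRange_one_eq_nil (by omega)]
    simp only [List.foldl_nil]
    have : ¬ (lo ≤ (j : Int) ∧ (j : Int) < hi) := by omega
    simp [this]
  | succ k ih =>
    rw [PySem.List.pyRange_one_cons (by omega)]
    simp only [List.foldl_cons]
    rw [ih (lo + 1) (m.set! lo.toNat true) (by omega) (by simp [Array.set!]; omega) (by omega)]
    have hj : (m.set! lo.toNat true).getD j false = if lo.toNat = j then true else m.getD j false := by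
      by_cases h : j < m.size
      · simp [Array.set!, Array.getD, h, Array.getElem_setIfInBounds]
      · have : ¬ lo.toNat = j := by omega
        simp [Array.set!, Array.getD, h, this]
    rw [hj]
    by_cases h : lo.toNat = j
    · have : lo = (j : Int) := by omega
      simp [this]
      omega
    · have h1 : (lo ≤ (j:Int) ∧ (j:Int) < hi) ↔ (lo + 1 ≤ (j:Int) ∧ (j:Int) < hi) := by omega
      simp [h, h1]

-- the full mask: a cell is set iff some span (clamped) contains it
theorem pv_getD_maskfold (vals : List (Int × Int)) (n : Nat) (m : Array Bool) (j : Nat)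
    (hm : m.size = n) (hj : j < n) :
    ((vals.foldl (fun m se =>
        (PySem.List.pyRange (max se.1 0) (max (min se.2 (n : Int)) 0) 1).foldl
          (fun m i => m.set! i.toNat true) m) m).getD j false)
      = (m.getD j false || vals.any (fun se => decide (se.1 ≤ (j : Int) ∧ (j : Int) < se.2))) := by
  induction vals generalizing m with
  | nil => simp
  | cons se rest ih =>
    simp only [List.foldl_cons, List.any_cons]
    have hsz : ((PySem.List.pyRange (max se.1 0) (max (min se.2 (n : Int)) 0) 1).foldl
        (fun m i => m.set! i.toNat true) m).size = n := by rw [pv_size_mark]; exact hm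
    rw [ih _ hsz]
    rw [pv_getD_mark ((max (min se.2 (n : Int)) 0 - max se.1 0).toNat) _ _ m j
        (by omega) (by omega) rfl]
    have heq : (max se.1 0 ≤ (j : Int) ∧ (j : Int) < max (min se.2 (n : Int)) 0)
        ↔ (se.1 ≤ (j : Int) ∧ (j : Int) < se.2) := by omega
    have hd : decide (max se.1 0 ≤ (j : Int) ∧ (j : Int) < max (min se.2 (n : Int)) 0)
        = decide (se.1 ≤ (j : Int) ∧ (j : Int) < se.2) := decide_eq_decide.mpr heq
    rw [hd, Bool.or_assoc]

-- A's helper is the negation of the any-span test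
theorem pv_outside_eq (pos : Int) (vals : List (Int × Int)) :
    pvOutsideAnySpan pos vals = ! vals.any (fun se => decide (se.1 ≤ pos ∧ pos < se.2)) := by
  induction vals with
  | nil => rfl
  | cons se rest ih =>
    rcases se with ⟨s, e⟩
    by_cases h : s ≤ pos ∧ pos < e
    · simp [pvOutsideAnySpan, h]
    · simp only [pvOutsideAnySpan, if_neg h, List.any_cons, decide_eq_false h,
        Bool.false_or, ih]

-- B's find-loop as a filter of the remaining index range
theorem pv_scan_filter (cs : List Char) (mask : Array Bool) (res : List Int) (k : Nat) :
    pvScan cs mask res k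
      = res ++ (PySem.List.pyRange (k : Int) (cs.length : Int) 1).filter
          (fun i => ((PySem.List.pyGet? cs i == some ' ') &&
             ((PySem.List.pyGet? cs (i - 1)).any (fun c => pvPunctChars.contains c))) &&
             !(mask.getD i.toNat false)) := by
  induction res, k using pvScan.induct cs mask with
  | case1 res k h =>
    rw [pvScan, dif_pos h]
    have hnil : (PySem.List.pyRange (k : Int) (cs.length : Int) 1).filter
        (fun i => ((PySem.List.pyGet? cs i == some ' ') &&
           ((PySem.List.pyGet? cs (i - 1)).any (fun c => pvPunctChars.contains c))) &&
           !(mask.getD i.toNat false)) = [] := by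
      by_cases hk : k ≤ cs.length
      · rw [List.filter_eq_nil_iff]
        intro i hi
        rw [PySem.List.mem_pyRange_one] at hi
        have hni : ¬ [' '] <:+: cs.drop k :=
          (PySem.Chars.findFrom_natCast_eq_neg_one_iff cs [' '] k hk).mp h
        have hne : cs[i.toNat]'(by omega) ≠ ' ' := by
          intro hsp
          apply hni
          have hmem : ' ' ∈ cs.drop k := by
            rw [List.mem_iff_getElem]
            exact ⟨i.toNat - k, by simp; omega,
              by rw [List.getElem_drop]; rw [← hsp]; congr 1; omega⟩
          obtain ⟨s, t, hst⟩ := List.mem_iff_append.mp hmem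
          exact ⟨s, t, by simp [hst]⟩
        simp [PySem.List.pyGet?, PySem.List.pyIdx?, show (0:Int) ≤ i by omega,
          show i < (cs.length : Int) by omega, hne]
      · rw [PySem.List.pyRange_one_eq_nil (by omega), List.filter_nil]
    rw [hnil, List.append_nil]
  | case2 res k h ih =>
    rw [pvScan, dif_neg h]
    obtain ⟨hkm, hmlen⟩ := pv_findFrom_bounds cs k h
    have hk : k ≤ cs.length := by omega
    obtain ⟨h1, h2, h3⟩ := PySem.Chars.findFrom_natCast_spec cs [' '] k hk h
    set F := PySem.Chars.findFrom cs [' '] (k : Int) none with hFdef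
    set m := F.toNat with hm
    have hF : F = ((m : Nat) : Int) := by omega
    obtain ⟨t, ht⟩ := h2
    have hsp : cs[m]'hmlen = ' ' := by
      have hd : cs.drop m = ' ' :: t := by simpa using ht.symm
      have hdg : cs.drop m = cs[m]'hmlen :: cs.drop (m + 1) :=
        List.drop_eq_getElem_cons hmlen
      exact (List.cons_eq_cons.mp (hdg.symm.trans hd)).1
    have e1 : ((m : Int) + 1) = (((m + 1 : Nat)) : Int) := by push_cast; ring
    have hsplit : PySem.List.pyRange (k : Int) (cs.length : Int) 1
        = (PySem.List.pyRange (k : Int) (m : Int) 1 ++ [(m : Int)])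
          ++ PySem.List.pyRange (((m + 1 : Nat)) : Int) (cs.length : Int) 1 := by
      rw [← PySem.List.pyRange_one_succ_right (by exact_mod_cast hkm), e1]
      rw [← PySem.List.pyRange_one_append (k : Int) (((m + 1 : Nat)) : Int) (cs.length : Int)
        (by omega) (by omega)]
    rw [hsplit, List.filter_append, List.filter_append]
    have hempty : (PySem.List.pyRange (k : Int) (m : Int) 1).filter
        (fun i => ((PySem.List.pyGet? cs i == some ' ') &&
           ((PySem.List.pyGet? cs (i - 1)).any (fun c => pvPunctChars.contains c))) &&
           !(mask.getD i.toNat false)) = [] := by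
      rw [List.filter_eq_nil_iff]
      intro i hi
      rw [PySem.List.mem_pyRange_one] at hi
      have hne : cs[i.toNat]'(by omega) ≠ ' ' := by
        intro hsp'
        apply h3 i.toNat (by omega) (by omega)
        refine ⟨cs.drop (i.toNat + 1), ?_⟩
        have hd : cs.drop i.toNat = ' ' :: cs.drop (i.toNat + 1) := by
          rw [List.drop_eq_getElem_cons (by omega), hsp']
        simp [hd]
      simp [PySem.List.pyGet?, PySem.List.pyIdx?, show (0:Int) ≤ i by omega,
        show i < (cs.length : Int) by omega, hne]
    rw [hempty, List.nil_append]
    simp only [dite_eq_ite] at ih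
    rw [ih]
    have hsingle : [((m : Nat) : Int)].filter
        (fun i => ((PySem.List.pyGet? cs i == some ' ') &&
           ((PySem.List.pyGet? cs (i - 1)).any (fun c => pvPunctChars.contains c))) &&
           !(mask.getD i.toNat false))
        = if ((PySem.List.pyGet? cs (((m : Nat) : Int) - 1)).any (fun c => pvPunctChars.contains c)) &&
            !(mask.getD m false) then [((m : Nat) : Int)] else [] := by
      have hget : PySem.List.pyGet? cs ((m : Nat) : Int) = some ' ' := by
        simp [PySem.List.pyGet?, PySem.List.pyIdx?, show ((m:Nat) : Int) < (cs.length : Int) by omega, hmlen, hsp]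
      simp only [List.filter_singleton, hget, beq_self_eq_true, Bool.true_and,
        Int.toNat_natCast, Bool.cond_eq_ite]
    rw [hF, hsingle]
    by_cases hc : (((PySem.List.pyGet? cs (((m : Nat) : Int) - 1)).any
        (fun c => pvPunctChars.contains c)) && !(mask.getD m false)) = true
    · rw [if_pos hc, if_pos hc]
      simp
    · rw [if_neg hc, if_neg hc]
      simp

-- A as a filter
theorem pv_A_filter (cs : List Char) (vals : List (Int × Int)) :
    ((PySem.List.pyRange 1 (cs.length : Int) 1).foldl
      (fun positions i =>
        if (PySem.List.pyGet? cs i == some ' ') &&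
           ((PySem.List.pyGet? cs (i - 1)).any (fun c => pvPunctChars.contains c)) then
          if pvOutsideAnySpan i vals then positions ++ [i] else positions
        else positions)
      ([] : List Int))
    = (PySem.List.pyRange 1 (cs.length : Int) 1).filter
        (fun i => ((PySem.List.pyGet? cs i == some ' ') &&
           ((PySem.List.pyGet? cs (i - 1)).any (fun c => pvPunctChars.contains c))) &&
           pvOutsideAnySpan i vals) := by
  have hfun : (fun (positions : List Int) (i : Int) =>
      if (PySem.List.pyGet? cs i == some ' ') &&
         ((PySem.List.pyGet? cs (i - 1)).any (fun c => pvPunctChars.contains c)) then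
        if pvOutsideAnySpan i vals then positions ++ [i] else positions
      else positions)
    = (fun (positions : List Int) (i : Int) =>
      if ((PySem.List.pyGet? cs i == some ' ') &&
          ((PySem.List.pyGet? cs (i - 1)).any (fun c => pvPunctChars.contains c))) &&
          pvOutsideAnySpan i vals then positions ++ [i] else positions) := by
    funext positions i
    by_cases h1 : ((PySem.List.pyGet? cs i == some ' ') &&
        ((PySem.List.pyGet? cs (i - 1)).any (fun c => pvPunctChars.contains c))) = true
    · by_cases h2 : pvOutsideAnySpan i vals = true
      · simp [h2]
      · simp [h2]
    · rw [if_neg h1, if_neg (by simp_all)]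
  rw [hfun, PySem.List.foldl_append_if_eq_filter]
  simp

-- ===== VERDICT (by name: the statement is the Claim_ definition above) =====
theorem punct_space_positions_py_spec : Claim_equal_punct_space_positions_py := by
  intro sentence spans _
  unfold Spec_punct_space_positions_py punct_space_positions_py punct_space_positions_py_alt
  rw [pv_A_filter, pv_scan_filter]
  rw [List.nil_append]
  apply List.filter_congr
  intro i hi
  rw [PySem.List.mem_pyRange_one] at hi
  obtain ⟨hi1, hi2⟩ := hi
  have hji : i = ((i.toNat : Nat) : Int) := by omega
  rw [hji]
  rw [pv_getD_maskfold _ sentence.toList.length _ _ (by simp) (by omega)]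
  rw [pv_outside_eq]
  have hL : sentence.toList.length = sentence.length := by simp
  have hlt : (max i 0).toNat < sentence.length := by omega
  simp [hlt]
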